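-- pv_equiv track=rewrite | github.com/yangtau/yangtau.github.io | yabg/main.py | split_markdown
-- ===== SOURCE A (Python) =====
-- def split_markdown(lines: [str]) -> ([str], [str]):
--     '''return the lines of metadata and the lines of markdown content'''
--     first, second = -1, -1
--     for k in range(len(lines)):
--         if lines[k] == '---\n':
--             if first == -1:
--                 first = k
--             else:
--                 second = k
--                 break
--     else:
--         raise Exception('No metadata found in markdown file.')
--     return (lines[first+1:second], lines[second+1:])
-- ===== SOURCE B (Python) =====
-- def split_markdown(lines):
--     '''return the lines of metadata and the lines of markdown content'''
--     it = iter(lines)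
--     for l in it:
--         if l == '---\n':
--             break
--     else:
--         raise Exception('No metadata found in markdown file.')
--     meta = []
--     for l in it:
--         if l == '---\n':
--             return (meta, list(it))
--         meta.append(l)
--     raise Exception('No metadata found in markdown file.')
-- ===== Notes on version B (the rewrite author's own statement) =====
-- stated objective: idiomatic
-- what changed: replaces A's index loop over range(len(lines)) with two-variable state plus break and slicing by absolute indices with a shared-iterator two-phase consumption: the first for-loop consumes up to the first delimiter, the second accumulates metadata until the second delimiter and returns the iterator's remainder, using no indices or slices at all
import Mathlib
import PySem

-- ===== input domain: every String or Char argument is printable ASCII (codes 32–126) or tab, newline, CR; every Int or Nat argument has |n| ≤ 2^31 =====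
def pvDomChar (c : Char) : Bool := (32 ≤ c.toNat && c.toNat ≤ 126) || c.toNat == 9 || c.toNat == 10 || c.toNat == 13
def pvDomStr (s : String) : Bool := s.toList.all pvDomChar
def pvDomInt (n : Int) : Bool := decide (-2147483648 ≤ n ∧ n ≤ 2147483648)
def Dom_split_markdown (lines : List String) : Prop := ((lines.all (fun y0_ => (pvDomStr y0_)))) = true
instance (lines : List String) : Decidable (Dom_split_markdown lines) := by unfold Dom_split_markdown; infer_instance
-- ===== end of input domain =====

-- B replaces A's index loop (range(len(lines)), two-variable state, break, slicing by absolute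
-- indices) with a shared-iterator two-phase consumption that uses no indices or slices; objective: idiomatic.
-- Both Pythons raise Exception('No metadata found in markdown file.') when the input holds fewer
-- than two '---\n' lines: those inputs are excluded by Pre_split_markdown (ports return ([], []) there).

-- ===== PORT A =====
-- the for-k loop over range(len(lines)) carrying the state (first, second) with early break;
-- returns none on the for/else path (Python raises there)
def pvFindA (rest : List String) (k : Int) (first : Int) : Option (Int × Int) :=
  match rest with
  | [] => none
  | l :: rest' =>
    if l = "---\n" then
      if first = -1 then pvFindA rest' (k + 1) k
      else some (first, k)
    else pvFindA rest' (k + 1) first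

def split_markdown (lines : List String) : List String × List String :=
  match pvFindA lines 0 (-1) with
  | none => ([], [])   -- Python raises here; excluded by Pre_split_markdown
  | some (first, second) =>
      (PySem.List.slice lines (some (first + 1)) (some second),
       PySem.List.slice lines (some (second + 1)) none)

-- ===== PORT B =====
-- phase 1: 'for l in it: if l == "---\n": break' — consume the iterator (= list remainder)
-- up to and including the first delimiter; none models the for/else raise
def pvPhase1 (it : List String) : Option (List String) :=
  match it with
  | [] => none
  | l :: it' => if l = "---\n" then some it' else pvPhase1 it'

-- phase 2: 'for l in it: if l == "---\n": return (meta, list(it)); meta.append(l)';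
-- none models falling off the loop and raising
def pvPhase2 (acc : List String) (it : List String) : Option (List String × List String) :=
  match it with
  | [] => none
  | l :: it' => if l = "---\n" then some (acc, it') else pvPhase2 (acc ++ [l]) it'

def split_markdown_alt (lines : List String) : List String × List String :=
  match pvPhase1 lines with
  | none => ([], [])   -- Python raises here; excluded by Pre_split_markdown
  | some it =>
    match pvPhase2 [] it with
    | none => ([], [])   -- Python raises here; excluded by Pre_split_markdown
    | some r => r

-- ===== PRECONDITION & SPEC =====
-- Pre_ excludes exactly the inputs with fewer than two '---\n' lines, on which A (and B) raises Exception.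
def Pre_split_markdown (lines : List String) : Prop :=
  2 ≤ (lines.filter (fun l => l == "---\n")).length
instance (lines : List String) : Decidable (Pre_split_markdown lines) := by
  unfold Pre_split_markdown; infer_instance

def pvWitness_split_markdown : List String := ["---\n", "title: x\n", "---\n", "body\n"]

def Spec_split_markdown (lines : List String) (out : List String × List String) : Prop := out = split_markdown_alt lines
instance (lines : List String) (out : List String × List String) : Decidable (Spec_split_markdown lines out) := by unfold Spec_split_markdown; infer_instance

-- ===== CLAIM (what is proved, stated in full; the proofs are below) =====
def Claim_equal_split_markdown : Prop := ∀ (lines : List String), Dom_split_markdown lines → Pre_split_markdown lines → Spec_split_markdown lines (split_markdown lines)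

-- ===== LEMMAS AND PROOFS =====

-- proof-side common spec: relative index of the first '---\n' in a list
def pvFirst (rest : List String) : Option Nat :=
  match rest with
  | [] => none
  | l :: rest' => if l = "---\n" then some 0 else (pvFirst rest').map (· + 1)

-- A's loop once the first delimiter was found at `first`: it finds the next delimiter
lemma pvFindA_found (rest : List String) (k first : Int) (hf : first ≠ -1) :
    pvFindA rest k first = (pvFirst rest).map (fun j => (first, k + (j : Int))) := by
  induction rest generalizing k with
  | nil => simp [pvFindA, pvFirst]
  | cons l rest ih =>
    simp only [pvFindA, pvFirst]
    split_ifs with h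
    · simp
    · rw [ih (k + 1)]
      cases pvFirst rest with
      | none => simp
      | some j => simp; omega

-- A's loop in searching state: it finds the first delimiter, then the next one after it
lemma pvFindA_searching (rest : List String) (k : Nat) :
    pvFindA rest (k : Int) (-1) =
      match pvFirst rest with
      | none => none
      | some j =>
        match pvFirst (rest.drop (j + 1)) with
        | none => none
        | some j' => some ((k + j : Nat), ((k + j + 1 + j' : Nat) : Int)) := by
  induction rest generalizing k with
  | nil => simp [pvFindA, pvFirst]
  | cons l rest ih =>
    have e : (k : Int) + 1 = ((k + 1 : Nat) : Int) := by push_cast; ring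
    simp only [pvFindA, pvFirst]
    split_ifs with h
    · rw [e, pvFindA_found rest ((k + 1 : Nat) : Int) (k : Int) (by omega)]
      simp only [Nat.zero_add, List.drop_succ_cons, List.drop_zero]
      cases hf : pvFirst rest with
      | none => simp
      | some j' => simp
    · rw [e, ih (k + 1)]
      cases hf : pvFirst rest with
      | none => simp
      | some j =>
        simp only [Option.map_some, List.drop_succ_cons]
        cases pvFirst (rest.drop (j + 1)) with
        | none => simp
        | some j' => simp; omega

-- B's first phase drops through the first delimiter
lemma pvPhase1_eq (rest : List String) :
    pvPhase1 rest = (pvFirst rest).map (fun j => rest.drop (j + 1)) := by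
  induction rest with
  | nil => simp [pvPhase1, pvFirst]
  | cons l rest ih =>
    simp only [pvPhase1, pvFirst]
    split_ifs with h
    · simp
    · rw [ih]; cases pvFirst rest <;> simp

-- B's second phase takes up to the next delimiter and keeps the remainder
lemma pvPhase2_eq (acc : List String) (rest : List String) :
    pvPhase2 acc rest = (pvFirst rest).map (fun j => (acc ++ rest.take j, rest.drop (j + 1))) := by
  induction rest generalizing acc with
  | nil => simp [pvPhase2, pvFirst]
  | cons l rest ih =>
    simp only [pvPhase2, pvFirst]
    split_ifs with h
    · simp
    · rw [ih]; cases pvFirst rest <;> simp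

-- ===== VERDICT (by name: the statement is the Claim_ definition above) =====
theorem split_markdown_spec : Claim_equal_split_markdown := by
  intro lines _ _
  unfold Spec_split_markdown split_markdown split_markdown_alt
  rw [pvPhase1_eq]
  have h0 : (0 : Int) = ((0 : Nat) : Int) := rfl
  rw [h0, pvFindA_searching lines 0]
  cases hf : pvFirst lines with
  | none => simp
  | some j =>
    simp only [Option.map_some, Nat.zero_add]
    rw [pvPhase2_eq [] (lines.drop (j + 1))]
    cases hs : pvFirst (lines.drop (j + 1)) with
    | none => simp
    | some j' =>
      simp only [Option.map_some, List.nil_append]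
      have e1 : ((j : Nat) : Int) + 1 = ((j + 1 : Nat) : Int) := by push_cast; ring
      have e3 : ((j + 1 + j' : Nat) : Int) + 1 = ((j + 1 + j' + 1 : Nat) : Int) := by
        push_cast; ring
      have e2 : ((j + 1 + j' : Nat) : Int) = ((j + 1 : Nat) : Int) + ((j' : Nat) : Int) := by
        push_cast; ring
      rw [e1, e3, e2, PySem.List.slice_natCast_add, PySem.List.slice_from_natCast]
      rw [List.drop_drop]
      have : j + 1 + (j' + 1) = j + 1 + j' + 1 := by omega
      rw [this]
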